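-- pv_equiv track=rewrite | github.com/Soopro/pyco | core/utils/misc.py | sortedby
-- ===== SOURCE A (Python) =====
-- from functools import cmp_to_key
--
-- def parse_sortby(sort_by):
--     key = None
--     direction = None
--     if isinstance(sort_by, str):
--         if sort_by.startswith('+'):
--             key = sort_by.lstrip('+')
--             direction = 1
--         else:
--             key = sort_by.lstrip('-')
--             direction = -1
--     elif isinstance(sort_by, tuple):
--         key = sort_by[0]
--         direction = sort_by[1]
--     else:
--         return None
--     return (key, direction)
--
-- def sortedby(source, sort_keys, reverse=False):
--     if isinstance(sort_keys, (str, tuple)):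
--         sort_keys = [sort_keys]
--     elif not isinstance(sort_keys, list):
--         sort_keys = []
--
--     sorts = [parse_sortby(key) for key in sort_keys]
--
--     def compare(a, b):
--         for sort in sorts:
--             if sort is None:
--                 continue
--             key = sort[0]
--             direction = sort[1]
--             if a.get(key) < b.get(key):
--                 return -1 * direction
--             if a.get(key) > b.get(key):
--                 return 1 * direction
--         return 0
--
--     return sorted(source, key=cmp_to_key(compare), reverse=reverse)
-- ===== SOURCE B (Python) =====
-- class _Reverse:
--     """Inverts the ordering of the wrapped value; equality is value equality."""
--     __slots__ = ('value',)
--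
--     def __init__(self, value):
--         self.value = value
--
--     def __eq__(self, other):
--         return self.value == other.value
--
--     def __lt__(self, other):
--         return other.value < self.value
--
--
-- def sortedby(source, sort_keys, reverse=False):
--     if isinstance(sort_keys, (str, tuple)):
--         sort_keys = [sort_keys]
--     elif not isinstance(sort_keys, list):
--         sort_keys = []
--
--     sorts = []
--     for sort_by in sort_keys:
--         if isinstance(sort_by, str):
--             if sort_by.startswith('+'):
--                 sorts.append((sort_by.lstrip('+'), 1))
--             else:
--                 sorts.append((sort_by.lstrip('-'), -1))
--         elif isinstance(sort_by, tuple):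
--             sorts.append((sort_by[0], sort_by[1]))
--         # non-str/non-tuple entries contribute nothing (A skips its None parses)
--
--     def keyfunc(item):
--         return tuple(_Reverse(item.get(k)) if d == -1 else item.get(k)
--                      for k, d in sorts)
--
--     return sorted(source, key=keyfunc, reverse=reverse)
-- ===== Notes on version B (the rewrite author's own statement) =====
-- stated objective: idiomatic
-- what changed: B replaces A's cmp_to_key pairwise comparator with a key function mapping each dict to a tuple of its sort-field values (descending fields wrapped in a small order-inverting Reverse class) handed to sorted(key=..., reverse=reverse).
-- outside the precondition, e.g. on sortedby([{'a': 1}, {'a': 1}], ['+a', 'b'], False): A raises TypeError, B returns [{'a': 1}, {'a': 1}]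
import Mathlib
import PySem

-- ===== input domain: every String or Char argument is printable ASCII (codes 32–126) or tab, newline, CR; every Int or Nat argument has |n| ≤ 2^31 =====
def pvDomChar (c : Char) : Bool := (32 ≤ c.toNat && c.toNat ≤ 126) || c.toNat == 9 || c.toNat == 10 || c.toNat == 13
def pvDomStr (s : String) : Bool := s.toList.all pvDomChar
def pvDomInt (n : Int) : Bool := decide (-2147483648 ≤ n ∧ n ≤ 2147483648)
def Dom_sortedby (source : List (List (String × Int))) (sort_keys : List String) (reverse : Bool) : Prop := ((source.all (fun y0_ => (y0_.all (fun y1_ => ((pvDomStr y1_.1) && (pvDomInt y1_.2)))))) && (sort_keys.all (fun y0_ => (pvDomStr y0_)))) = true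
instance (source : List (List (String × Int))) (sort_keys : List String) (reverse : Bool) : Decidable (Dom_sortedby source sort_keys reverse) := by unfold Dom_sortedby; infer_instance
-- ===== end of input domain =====

-- B replaces A's cmp_to_key pairwise comparator by a precomputed direction-signed key
-- tuple passed to sorted(key=...) (objective: idiomatic); return-value equivalence only.

-- ===== PORT A =====
-- parse_sortby for a str argument (under the type convention sort_keys : List String,
-- so the tuple / None branches are unreachable and every parse is `some`).
-- s.lstrip('+') / s.lstrip('-') is dropWhile on the single stripped character (exact).
def pvParseSortby (sort_by : String) : String × Int :=
  if PySem.Str.startswith sort_by "+" then (String.ofList (sort_by.toList.dropWhile (· == '+')), 1)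
  else (String.ofList (sort_by.toList.dropWhile (· == '-')), -1)

def pvGet (item : List (String × Int)) (k : String) : Option Int :=
  PySem.Dict.get? (PySem.Dict.mk item) k

-- A's `compare`: walk `sorts`, decide on the first key whose values differ.
-- The `| _, _ =>` fallback is where Python raises TypeError (None compared to int);
-- Pre_sortedby excludes those inputs.
def pvCompare (sorts : List (String × Int)) (a b : List (String × Int)) : Int :=
  match sorts with
  | [] => 0
  | (key, direction) :: rest =>
    match pvGet a key, pvGet b key with
    | some va, some vb =>
      if va < vb then -1 * direction
      else if vb < va then 1 * direction
      else pvCompare rest a b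
    | _, _ => pvCompare rest a b

-- sorted(source, key=cmp_to_key(compare), reverse=reverse): Python's stable sort with
-- before a b = K(a) < K(b) (resp. K(b) < K(a) when reverse), K(x) < K(y) ↔ compare(x,y) < 0;
-- written in the foldl/insertBy shape of PySem.List.sorted (sorted_eq_foldl_insertBy).
def sortedby (source : List (List (String × Int))) (sort_keys : List String) (reverse : Bool) : List (List (String × Int)) :=
  let sorts := sort_keys.map pvParseSortby
  List.foldl
    (fun acc x => PySem.List.insertBy
      (fun a b => decide ((if reverse then pvCompare sorts b a else pvCompare sorts a b) < 0)) x acc)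
    [] source

-- ===== PORT B =====
-- B's keyfunc: tuple(_Reverse(item.get(k)) if d == -1 else item.get(k)). On the Int
-- domain the _Reverse wrapper (__lt__ inverted, __eq__ value equality) is represented
-- exactly by negation, the order-reversing embedding of Int. .getD 0 is unreachable
-- under Pre_sortedby when a comparison would touch it (Python raises TypeError there).
def pvKeyOf (sorts : List (String × Int)) (item : List (String × Int)) : List Int :=
  sorts.map (fun kd => if kd.2 == -1 then -((pvGet item kd.1).getD 0) else (pvGet item kd.1).getD 0)

def sortedby_alt (source : List (List (String × Int))) (sort_keys : List String) (reverse : Bool) : List (List (String × Int)) :=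
  PySem.List.sorted source (pvKeyOf (sort_keys.map pvParseSortby)) reverse

-- ===== PRECONDITION & SPEC =====
-- Pre_ excludes multi-element sources in which some dict lacks some (stripped) sort
-- key: there Python A raises TypeError whenever such a None value is compared, and on
-- the remaining degenerate such inputs where A still returns (an earlier key decides
-- every comparison, or two None values meet and A raises on None < None where B's
-- tuple equality passes) the corner is an accident of A's comparison order.
def Pre_sortedby (source : List (List (String × Int))) (sort_keys : List String) (reverse : Bool) : Prop :=
  source.length ≤ 1 ∨ ∀ item ∈ source, ∀ sk ∈ sort_keys, (pvGet item (pvParseSortby sk).1).isSome = true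
instance (source : List (List (String × Int))) (sort_keys : List String) (reverse : Bool) : Decidable (Pre_sortedby source sort_keys reverse) := by unfold Pre_sortedby; infer_instance

def pvWitness_sortedby : (List (List (String × Int))) × List String × Bool :=
  ([[("a", 2), ("b", 1)], [("a", 1), ("b", 5)]], ["+a", "b"], false)

def Spec_sortedby (source : List (List (String × Int))) (sort_keys : List String) (reverse : Bool) (out : List (List (String × Int))) : Prop := out = sortedby_alt source sort_keys reverse
instance (source : List (List (String × Int))) (sort_keys : List String) (reverse : Bool) (out : List (List (String × Int))) : Decidable (Spec_sortedby source sort_keys reverse out) := by unfold Spec_sortedby; infer_instance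

-- ===== CLAIM (what is proved, stated in full; the proofs are below) =====
def Claim_equal_sortedby : Prop := ∀ (source : List (List (String × Int))) (sort_keys : List String) (reverse : Bool), Dom_sortedby source sort_keys reverse → Pre_sortedby source sort_keys reverse → Spec_sortedby source sort_keys reverse (sortedby source sort_keys reverse)

-- ===== LEMMAS AND PROOFS =====

lemma pvParseSortby_dir (sk : String) : (pvParseSortby sk).2 = 1 ∨ (pvParseSortby sk).2 = -1 := by
  unfold pvParseSortby; split <;> simp

lemma pvKeyOf_cons (kd : String × Int) (rest : List (String × Int)) (item : List (String × Int)) :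
    pvKeyOf (kd :: rest) item
      = (if kd.2 == -1 then -((pvGet item kd.1).getD 0) else (pvGet item kd.1).getD 0)
        :: pvKeyOf rest item := rfl

-- the comparator's strict order is exactly lexicographic < on the signed key tuples
lemma pvCompare_lt_iff (sorts : List (String × Int)) (a b : List (String × Int))
    (hdir : ∀ kd ∈ sorts, kd.2 = 1 ∨ kd.2 = -1)
    (ha : ∀ kd ∈ sorts, (pvGet a kd.1).isSome = true)
    (hb : ∀ kd ∈ sorts, (pvGet b kd.1).isSome = true) :
    pvCompare sorts a b < 0 ↔ pvKeyOf sorts a < pvKeyOf sorts b := by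
  induction sorts with
  | nil => simp [pvCompare, pvKeyOf]
  | cons kd rest ih =>
    obtain ⟨k, d⟩ := kd
    obtain ⟨va, hva⟩ := Option.isSome_iff_exists.mp (ha (k, d) (by simp))
    obtain ⟨vb, hvb⟩ := Option.isSome_iff_exists.mp (hb (k, d) (by simp))
    have ih' := ih (fun kd h => hdir kd (by simp [h])) (fun kd h => ha kd (by simp [h]))
      (fun kd h => hb kd (by simp [h]))
    rw [pvCompare.eq_def]
    simp only [hva, hvb, pvKeyOf_cons, Option.getD_some]
    rw [List.cons_lt_cons_iff]
    rw [show (pvKeyOf rest a < pvKeyOf rest b) = (pvCompare rest a b < 0) from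
      (propext ih').symm] at *
    rcases hdir (k, d) (by simp) with hd | hd <;> subst hd <;>
      simp only [Int.reduceBEq, Bool.false_eq_true, if_false, if_true] <;>
      rcases lt_trichotomy va vb with h | h | h <;>
      · constructor
        · intro hc
          split_ifs at hc <;> omega
        · intro hk
          split_ifs <;> omega

-- insertBy only consults `before x y` for y in the accumulator
lemma insertBy_congr {α : Type} (f g : α → α → Bool) (x : α) (acc : List α)
    (h : ∀ y ∈ acc, f x y = g x y) :
    PySem.List.insertBy f x acc = PySem.List.insertBy g x acc := by
  induction acc with
  | nil => rfl
  | cons y ys ih =>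
    rw [PySem.List.insertBy.eq_def, PySem.List.insertBy.eq_def]
    simp only []
    rw [h y (by simp)]
    split
    · rfl
    · rw [ih (fun z hz => h z (by simp [hz]))]

lemma foldl_insertBy_congr {α : Type} (f g : α → α → Bool) (S : List α)
    (hfg : ∀ a ∈ S, ∀ b ∈ S, f a b = g a b) :
    ∀ (xs acc : List α), (∀ x ∈ xs, x ∈ S) → (∀ y ∈ acc, y ∈ S) →
    List.foldl (fun acc x => PySem.List.insertBy f x acc) acc xs
      = List.foldl (fun acc x => PySem.List.insertBy g x acc) acc xs := by
  intro xs
  induction xs with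
  | nil => intro acc _ _; rfl
  | cons x xs ih =>
    intro acc hxs hacc
    simp only [List.foldl_cons]
    rw [insertBy_congr f g x acc (fun y hy => hfg x (hxs x (by simp)) y (hacc y hy))]
    exact ih _ (fun z hz => hxs z (by simp [hz]))
      (fun y hy => by
        rcases (PySem.List.mem_insertBy g x y acc).1 hy with h | h
        · exact h ▸ hxs x (by simp)
        · exact hacc y h)

-- ===== VERDICT (by name: the statement is the Claim_ definition above) =====
theorem sortedby_spec : Claim_equal_sortedby := by
  intro source sort_keys reverse _hdom hpre
  rcases hpre with hlen | hpre
  · -- ≤ 1 element: both sorts are the identity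
    match source, hlen with
    | [], _ => rfl
    | [x], _ => cases reverse <;> rfl
  unfold Spec_sortedby sortedby sortedby_alt
  have hdir : ∀ kd ∈ sort_keys.map pvParseSortby, kd.2 = 1 ∨ kd.2 = -1 := by
    intro kd hkd
    obtain ⟨sk, _, rfl⟩ := List.mem_map.mp hkd
    exact pvParseSortby_dir sk
  have hsome : ∀ x ∈ source, ∀ kd ∈ sort_keys.map pvParseSortby, (pvGet x kd.1).isSome = true := by
    intro x hx kd hkd
    obtain ⟨sk, hsk, rfl⟩ := List.mem_map.mp hkd
    exact hpre x hx sk hsk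
  cases reverse with
  | false =>
    rw [PySem.List.sorted_eq_foldl_insertBy]
    refine (foldl_insertBy_congr _ _ source ?_ source [] (fun x hx => hx) (by simp)).symm.symm
    intro a ha b hb
    simp only [Bool.false_eq_true, if_false, decide_eq_decide]
    exact pvCompare_lt_iff _ a b hdir (hsome a ha) (hsome b hb)
  | true =>
    rw [PySem.List.sorted_rev_eq_foldl_insertBy]
    refine foldl_insertBy_congr _ _ source ?_ source [] (fun x hx => hx) (by simp)
    intro a ha b hb
    simp only [if_true, decide_eq_decide]
    exact pvCompare_lt_iff _ b a hdir (hsome b hb) (hsome a ha)
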